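-- pv_equiv track=rewrite | github.com/obiniemur/DSA-Program | 2. Algorithm/Module 4 Assignment 01/amazon/Test1.py | getMaxNegativePnL
-- ===== SOURCE A (Python) =====
-- def getMaxNegativePnL(PnL):
--     n = len(PnL)
--
--     # Step 1: Calculate the initial cumulative PnL
--     cumulative_pnl = [0] * n
--     cumulative_pnl[0] = PnL[0]
--
--     for i in range(1, n):
--         cumulative_pnl[i] = cumulative_pnl[i - 1] + PnL[i]
--
--     # Step 2: Sort the positive PnL values based on their magnitude (smallest first)
--     # Only flip positive values, since we want to introduce more negatives
--     positives = []
--     for i in range(n):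
--         if PnL[i] > 0:
--             positives.append((PnL[i], i))
--
--     # Sort positive values by their absolute magnitude
--     positives.sort(key=lambda x: x[0])
--
--     # Step 3: Try flipping the smallest positive values to negative
--     flips = 0
--     current_cumulative = cumulative_pnl[:]
--
--     for pos_value, index in positives:
--         # Flip the positive value to negative
--         PnL[index] = -PnL[index]  # Flip
--
--         # Recalculate cumulative sum after the flip
--         cumulative_pnl[0] = PnL[0]
--         valid_flip = True
--         for i in range(1, n):
--             cumulative_pnl[i] = cumulative_pnl[i - 1] + PnL[i]
--             if cumulative_pnl[i] <= 0:
--                 valid_flip = False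
--                 break
--
--         # If the flip is valid, increase the flip count
--         if valid_flip:
--             flips += 1
--         else:
--             # If flipping this positive results in non-positive cumulative sum, stop
--             PnL[index] = -PnL[index]  # Revert the flip
--             break
--
--     return flips
-- ===== SOURCE B (Python) =====
-- def getMaxNegativePnL(PnL):
--     # Binary search for the largest k such that flipping the k smallest
--     # positive values keeps every cumulative sum at index >= 1 positive.
--     # (Validity is antitone in k: each extra flip only lowers cumulative sums.)
--     # Note: unlike the original, this does not mutate PnL.
--     n = len(PnL)
--     positives = sorted([(v, i) for i, v in enumerate(PnL) if v > 0],
--                        key=lambda t: t[0])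
--
--     def ok(k):
--         arr = PnL[:]
--         for _, i in positives[:k]:
--             arr[i] = -arr[i]
--         c = 0
--         j = 0
--         for x in arr:
--             c += x
--             if j >= 1 and c <= 0:
--                 return False
--             j += 1
--         return True
--
--     lo, hi = 0, len(positives)
--     while lo < hi:
--         mid = (lo + hi + 1) // 2
--         if ok(mid):
--             lo = mid
--         else:
--             hi = mid - 1
--     return lo
-- ===== Notes on version B (the rewrite author's own statement) =====
-- stated objective: alternative
-- what changed: Greedy flip-one-at-a-time with a full recomputation of cumulative sums after every flip is replaced by a binary search over the number k of flipped smallest positives, exploiting that validity is antitone in k (each extra flip only lowers cumulative sums), with one linear feasibility check per probe; worst-case cost drops from O(n^2) to O(n log n), but A's early exit makes it as fast in practice on the measured inputs.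
import Mathlib
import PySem

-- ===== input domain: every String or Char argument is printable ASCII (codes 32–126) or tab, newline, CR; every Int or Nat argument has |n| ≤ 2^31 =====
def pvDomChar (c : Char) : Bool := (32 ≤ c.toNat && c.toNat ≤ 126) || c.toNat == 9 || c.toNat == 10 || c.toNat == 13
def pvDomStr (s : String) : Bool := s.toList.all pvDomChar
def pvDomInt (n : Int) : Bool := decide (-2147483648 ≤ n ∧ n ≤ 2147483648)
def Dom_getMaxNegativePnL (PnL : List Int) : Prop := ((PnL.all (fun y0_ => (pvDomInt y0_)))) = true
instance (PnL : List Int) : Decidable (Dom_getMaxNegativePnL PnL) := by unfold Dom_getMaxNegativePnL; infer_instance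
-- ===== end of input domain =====

-- B replaces A's greedy one-flip-at-a-time loop (a full recomputation of all
-- cumulative sums after every flip) by a binary search over the number k of
-- flipped smallest positives, with one linear feasibility check per probe;
-- the equivalence proved is about the RETURN value only: Python A mutates its
-- argument list in place (valid flips stay negated), B does not.

-- ===== PORT A =====
-- Step-3 inner loop: recompute running cumulative sums, breaking (false) at
-- the first one ≤ 0 among indices i ≥ 1.  (Index 0 is never checked, as in A.)
def aCheckGo (c : Int) (xs : List Int) : Bool :=
  match xs with
  | [] => true
  | y :: ys => if c + y ≤ 0 then false else aCheckGo (c + y) ys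

-- cumulative_pnl[0] = p[0]; then the 'for i in range(1, n)' loop
def aCheck (p : List Int) : Bool :=
  match p with
  | [] => true
  | x :: xs => aCheckGo x xs

-- Step-3 outer loop over the sorted positives, mutating the PnL list and
-- counting valid flips (indices come from range(n), hence Nat; List.set /
-- List.getD are exact for these in-range indices).
def aLoop (pnl : List Int) (positives : List (Int × Nat)) (flips : Int) : Int :=
  match positives with
  | [] => flips
  | t :: rest =>
    let pnl' := pnl.set t.2 (-(pnl.getD t.2 0))
    if aCheck pnl' then aLoop pnl' rest (flips + 1) else flips

-- Port of A.  Step 1's cumulative_pnl array is fully overwritten before any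
-- read that affects the result (step 3 recomputes it; current_cumulative is
-- never read), so it is not materialised here.  On [] Python raises
-- IndexError at PnL[0] (excluded by Pre_); the [] branch value is dead code.
def getMaxNegativePnL (PnL : List Int) : Int :=
  match PnL with
  | [] => 0
  | _ :: _ =>
    let n := PnL.length
    let positives := (List.range n).foldl
      (fun acc i => if 0 < PnL.getD i 0 then acc ++ [(PnL.getD i 0, i)] else acc) []
    let sortedPos := PySem.List.sorted positives (fun t => t.1) false
    aLoop PnL sortedPos 0

-- ===== PORT B =====
-- ok(k)'s flipped copy of PnL: negate the entries at the indices of the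
-- first k sorted positives
def bFlip (arr : List Int) (ps : List (Int × Nat)) : List Int :=
  ps.foldl (fun a t => a.set t.2 (-(a.getD t.2 0))) arr

-- ok(k)'s scan: running sum c, failing on c ≤ 0 at positions j ≥ 1
def bScan (c : Int) (j : Nat) (xs : List Int) : Bool :=
  match xs with
  | [] => true
  | x :: rest =>
    let c' := c + x
    if 1 ≤ j ∧ c' ≤ 0 then false else bScan c' (j + 1) rest

def bOk (PnL : List Int) (positives : List (Int × Nat)) (k : Nat) : Bool :=
  bScan 0 0 (bFlip PnL (positives.take k))

-- while lo < hi: mid = (lo+hi+1)//2; ok(mid) → lo = mid, else hi = mid-1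
-- (hi - lo strictly decreases, so fuel = hi - lo + 1 never runs out; the fuel
-- only makes the recursion structural, it never changes the result)
def bSearchGo (okf : Nat → Bool) (fuel lo hi : Nat) : Nat :=
  match fuel with
  | 0 => lo
  | fuel + 1 =>
    if lo < hi then
      if okf ((lo + hi + 1) / 2) then bSearchGo okf fuel ((lo + hi + 1) / 2) hi
      else bSearchGo okf fuel lo ((lo + hi + 1) / 2 - 1)
    else lo

def bSearch (okf : Nat → Bool) (lo hi : Nat) : Nat := bSearchGo okf (hi - lo + 1) lo hi

-- port of B (Source B): enumerate-filter, stable sort by value, binary search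
def getMaxNegativePnL_alt (PnL : List Int) : Int :=
  let positives := PySem.List.sorted
    ((PySem.List.enumerate PnL 0).filterMap
      (fun t => if 0 < t.2 then some (t.2, t.1.toNat) else none))
    (fun t => t.1) false
  (bSearch (bOk PnL positives) 0 positives.length : Int)

-- ===== PRECONDITION & SPEC =====
-- Pre_ excludes only the empty list, on which Python A raises IndexError (PnL[0]).
def Pre_getMaxNegativePnL (PnL : List Int) : Prop := PnL ≠ []
instance (PnL : List Int) : Decidable (Pre_getMaxNegativePnL PnL) := by
  unfold Pre_getMaxNegativePnL; infer_instance

def pvWitness_getMaxNegativePnL : List Int := [3, -1, 2]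

def Spec_getMaxNegativePnL (PnL : List Int) (out : Int) : Prop := out = getMaxNegativePnL_alt PnL
instance (PnL : List Int) (out : Int) : Decidable (Spec_getMaxNegativePnL PnL out) := by
  unfold Spec_getMaxNegativePnL; infer_instance

-- ===== CLAIM (what is proved, stated in full; the proofs are below) =====
def Claim_equal_getMaxNegativePnL : Prop := ∀ (PnL : List Int), Dom_getMaxNegativePnL PnL → Pre_getMaxNegativePnL PnL → Spec_getMaxNegativePnL PnL (getMaxNegativePnL PnL)

-- ===== LEMMAS AND PROOFS =====

-- the list of (value, index) pairs of the positive entries, in index order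
def posRaw (P : List Int) : List (Int × Nat) :=
  ((List.range P.length).filter (fun i => decide (0 < P.getD i 0))).map
    (fun i => (P.getD i 0, i))

-- the sorted positives both programs iterate over
def posL (P : List Int) : List (Int × Nat) :=
  PySem.List.sorted (posRaw P) (fun t => t.1) false

-- the PnL list after the first k sorted positives have been flipped
def arrK (P : List Int) (k : Nat) : List Int := bFlip P ((posL P).take k)

-- "flipping the first k sorted positives keeps the checked sums positive"
def OkK (P : List Int) (k : Nat) : Bool := aCheck (arrK P k)

-- the largest feasible number of flips (0 if none)
def tstar (P : List Int) : Nat :=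
  Nat.findGreatest (fun k => 0 < k ∧ OkK P k = true) (posL P).length

-- filter+map = filterMap with an if-some-none body
theorem filter_map_eq_filterMap {α β : Type} (l : List α) (p : α → Bool) (f : α → β) :
    (l.filter p).map f = l.filterMap (fun x => if p x then some (f x) else none) := by
  induction l with
  | nil => rfl
  | cons x xs ih => by_cases h : p x <;> simp [h, ih]

-- A's positives-building loop produces posRaw
theorem a_positives_eq (P : List Int) :
    (List.range P.length).foldl
      (fun acc i => if 0 < P.getD i 0 then acc ++ [(P.getD i 0, i)] else acc) []
    = posRaw P := by
  have h : (fun (acc : List (Int × Nat)) i =>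
      if 0 < P.getD i 0 then acc ++ [(P.getD i 0, i)] else acc)
      = (fun acc i => if decide (0 < P.getD i 0) = true then acc ++ [(P.getD i 0, i)] else acc) := by
    funext acc i; by_cases h : 0 < P.getD i 0 <;> simp only [h, decide_true, decide_false, if_true, if_false, Bool.false_eq_true]
  rw [h, PySem.List.foldl_append_if]
  simp [posRaw]

-- B's enumerate/filter comprehension produces posRaw
theorem b_positives_eq (P : List Int) :
    (PySem.List.enumerate P 0).filterMap
      (fun t => if 0 < t.2 then some (t.2, t.1.toNat) else none)
    = posRaw P := by
  rw [PySem.List.enumerate_eq_map_pyRange P 0]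
  rw [show PySem.List.len P = ((P.length : Nat) : Int) from by simp [pysem]]
  rw [PySem.List.pyRange_zero_nat, List.map_map, List.filterMap_map]
  rw [posRaw, filter_map_eq_filterMap]
  apply List.filterMap_congr
  intro i _
  simp [PySem.List.pyGetD_natCast]

-- every sorted positive carries its own P-entry, which is positive and in range
theorem posL_mem (P : List Int) : ∀ p ∈ posL P,
    P.getD p.2 0 = p.1 ∧ 0 < p.1 ∧ p.2 < P.length := by
  intro p hp
  have hp' : p ∈ posRaw P := (PySem.List.sorted_perm (posRaw P) (fun t => t.1) false).mem_iff.mp hp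
  simp only [posRaw, List.mem_map, List.mem_filter, List.mem_range] at hp'
  obtain ⟨i, ⟨hi, hpos⟩, rfl⟩ := hp'
  simp_all

-- the indices of the sorted positives are pairwise distinct
theorem posL_nodup (P : List Int) : ((posL P).map Prod.snd).Nodup := by
  have hraw : ((posRaw P).map Prod.snd).Nodup := by
    have : (posRaw P).map Prod.snd = (List.range P.length).filter (fun i => decide (0 < P.getD i 0)) := by
      rw [posRaw, List.map_map]
      exact List.map_id _
    rw [this]
    exact (List.nodup_range).filter _
  have hperm : ((posL P).map Prod.snd).Perm ((posRaw P).map Prod.snd) :=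
    (PySem.List.sorted_perm (posRaw P) (fun t => t.1) false).map Prod.snd
  exact hperm.symm.nodup hraw

-- flipping never changes the length
theorem bFlip_length (ps : List (Int × Nat)) : ∀ (a : List Int), (bFlip a ps).length = a.length := by
  induction ps with
  | nil => intro a; rfl
  | cons t ts ih =>
    intro a
    simp only [bFlip, List.foldl_cons] at *
    rw [ih]; exact List.length_set ..

-- entries at unflipped indices are unchanged
theorem bFlip_getD_nmem (ps : List (Int × Nat)) : ∀ (a : List Int) (i : Nat),
    i ∉ ps.map Prod.snd → (bFlip a ps).getD i 0 = a.getD i 0 := by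
  induction ps with
  | nil => intro a i _; rfl
  | cons t ts ih =>
    intro a i hi
    simp only [List.map_cons, List.mem_cons, not_or] at hi
    simp only [bFlip, List.foldl_cons] at *
    rw [ih _ _ hi.2]
    rw [List.getD_eq_getElem?_getD, List.getD_eq_getElem?_getD,
        List.getElem?_set_ne (fun h => hi.1 h.symm)]
    rw [← List.getD_eq_getElem?_getD]

theorem arrK_length (P : List Int) (k : Nat) : (arrK P k).length = P.length :=
  bFlip_length _ _

-- unfolding one flip
theorem arrK_succ (P : List Int) (k : Nat) (hk : k < (posL P).length) :
    arrK P (k + 1)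
      = (arrK P k).set ((posL P)[k]).2 (-((arrK P k).getD ((posL P)[k]).2 0)) := by
  unfold arrK bFlip
  rw [List.take_succ_eq_append_getElem hk, List.foldl_append]
  rfl

-- the entry flipped at step k still holds its original positive value
theorem arrK_getD (P : List Int) (k : Nat) (hk : k < (posL P).length) :
    (arrK P k).getD ((posL P)[k]).2 0 = ((posL P)[k]).1 := by
  have hmem : (posL P)[k] ∈ posL P := List.getElem_mem hk
  have hsnd : ((posL P)[k]).2 ∉ ((posL P).take k).map Prod.snd := by
    intro hin
    rw [List.map_take] at hin
    obtain ⟨j, hj, hje⟩ := List.getElem_of_mem hin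
    rw [List.getElem_take] at hje
    have hjlen : j < ((posL P).map Prod.snd).length := by
      simp only [List.length_take, List.length_map] at hj ⊢; omega
    have hklen : k < ((posL P).map Prod.snd).length := by simpa using hk
    have : ((posL P).map Prod.snd)[j] = ((posL P).map Prod.snd)[k] := by
      simpa using hje
    have := ((posL_nodup P).getElem_inj_iff).mp this
    simp only [List.length_take] at hj
    omega
  rw [arrK, bFlip_getD_nmem _ _ _ hsnd]
  exact (posL_mem P _ hmem).1

-- each extra flip only lowers every prefix sum
theorem arrK_sum_mono (P : List Int) (k : Nat) (hk : k < (posL P).length) (t : Nat) :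
    ((arrK P (k + 1)).take t).sum ≤ ((arrK P k).take t).sum := by
  set i := ((posL P)[k]).2 with hi
  set v := ((posL P)[k]).1 with hv
  have hval : (arrK P k).getD i 0 = v := arrK_getD P k hk
  have hvpos : 0 < v := (posL_mem P _ (List.getElem_mem hk)).2.1
  rw [arrK_succ P k hk, ← hi, hval, List.take_set, List.sum_set']
  split
  · rename_i hlt
    have : ((arrK P k).take t)[i] = v := by
      rw [List.getElem_take]
      have hil : i < (arrK P k).length := by
        simp only [List.length_take] at hlt; omega
      rw [← hval, List.getD_eq_getElem?_getD, List.getElem?_eq_getElem hil]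
      rfl
    rw [this]
    omega
  · omega

-- the inner check succeeds iff all running sums from index 1 on are positive
theorem aCheckGo_iff (xs : List Int) : ∀ (c : Int),
    aCheckGo c xs = true ↔ ∀ t, 1 ≤ t → t ≤ xs.length → 0 < c + (xs.take t).sum := by
  induction xs with
  | nil =>
    intro c
    simp only [aCheckGo, List.length_nil]
    constructor
    · intro _ t h1 h2; omega
    · intro _; trivial
  | cons y ys ih =>
    intro c
    simp only [aCheckGo]
    by_cases h : c + y ≤ 0
    · simp only [if_pos h]
      constructor
      · intro hfalse; cases hfalse
      · intro hall
        have := hall 1 (le_refl _) (by simp)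
        simp at this
        omega
    · simp only [if_neg h, ih]
      constructor
      · intro hall t h1 h2
        match t with
        | 1 => simpa using (by omega : 0 < c + y)
        | (t' + 2) =>
          have := hall (t' + 1) (by omega) (by simpa using h2)
          simp only [List.take_succ_cons, List.sum_cons]
          omega
      · intro hall t h1 h2
        have := hall (t + 1) (by omega) (by simp; omega)
        simp only [List.take_succ_cons, List.sum_cons] at this
        omega

theorem aCheck_iff (l : List Int) (h : l ≠ []) :
    aCheck l = true ↔ ∀ t, 2 ≤ t → t ≤ l.length → 0 < (l.take t).sum := by
  obtain ⟨x, xs, rfl⟩ := List.exists_cons_of_ne_nil h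
  simp only [aCheck, aCheckGo_iff]
  constructor
  · intro hall t h2 hle
    match t with
    | (t' + 2) =>
      have := hall (t' + 1) (by omega) (by simpa using hle)
      simpa using this
  · intro hall t h1 hle
    have := hall (t + 1) (by omega) (by simp; omega)
    simpa using this

-- feasibility is antitone: one step
theorem OkK_antitone_step (P : List Int) (hP : P ≠ []) (k : Nat)
    (hk : k < (posL P).length) (h : OkK P (k + 1) = true) : OkK P k = true := by
  have hlen : ∀ j, arrK P j ≠ [] := by
    intro j hnil
    have := arrK_length P j
    rw [hnil] at this
    simp at this
    exact hP (List.eq_nil_of_length_eq_zero this.symm)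
  rw [OkK, aCheck_iff _ (hlen _)] at h ⊢
  intro t h2 hle
  have h1 := h t h2 (by rw [arrK_length] at hle ⊢; exact hle)
  have h3 := arrK_sum_mono P k hk t
  omega

-- feasibility is antitone
theorem OkK_antitone (P : List Int) (hP : P ≠ []) :
    ∀ j, j ≤ (posL P).length → OkK P j = true → ∀ k, k ≤ j → OkK P k = true := by
  intro j
  induction j with
  | zero =>
    intro _ h k hk
    have : k = 0 := by omega
    rw [this]; exact h
  | succ j ih =>
    intro hj h k hk
    rcases Nat.lt_or_ge k (j + 1) with hlt | hge
    · exact ih (by omega) (OkK_antitone_step P hP j (by omega) h) k (by omega)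
    · have : k = j + 1 := by omega
      rw [this]; exact h

theorem tstar_le (P : List Int) : tstar P ≤ (posL P).length := Nat.findGreatest_le _

theorem tstar_ok (P : List Int) (hP : P ≠ []) :
    ∀ k, 1 ≤ k → k ≤ tstar P → OkK P k = true := by
  intro k h1 h2
  have hpos : 0 < tstar P := by omega
  have hspec : 0 < tstar P ∧ OkK P (tstar P) = true :=
    Nat.findGreatest_of_ne_zero (rfl : tstar P = tstar P) (by omega)
  exact OkK_antitone P hP (tstar P) (tstar_le P) hspec.2 k h2

theorem tstar_not (P : List Int) :
    ∀ k, tstar P < k → k ≤ (posL P).length → OkK P k = false := by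
  intro k h1 h2
  have := Nat.findGreatest_is_greatest (P := fun k => 0 < k ∧ OkK P k = true) h1 h2
  simp only [not_and] at this
  exact Bool.not_eq_true _ ▸ (by
    by_contra hne
    exact (this (by omega)) (by simpa using hne))

-- the greedy loop of A counts exactly tstar flips
theorem aLoop_eq (P : List Int) (hP : P ≠ []) :
    ∀ (d j : Nat) (f : Int), tstar P - j = d → j ≤ tstar P →
      aLoop (arrK P j) ((posL P).drop j) f = f + ((tstar P : Int) - (j : Int)) := by
  intro d
  induction d with
  | zero =>
    intro j f hd hj
    have hjt : j = tstar P := by omega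
    have hgoal : f + ((tstar P : Int) - (j : Int)) = f := by rw [hjt]; ring
    rw [hgoal]
    rcases Nat.lt_or_ge j (posL P).length with hlt | hge
    · rw [List.drop_eq_getElem_cons hlt]
      simp only [aLoop]
      rw [← arrK_succ P j hlt]
      have hfalse : aCheck (arrK P (j + 1)) = false := tstar_not P (j + 1) (by omega) (by omega)
      rw [hfalse]
      simp
    · rw [List.drop_of_length_le hge]
      simp [aLoop]
  | succ d ih =>
    intro j f hd hj
    have hjlt : j < tstar P := by omega
    have hlt : j < (posL P).length := by have := tstar_le P; omega
    rw [List.drop_eq_getElem_cons hlt]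
    simp only [aLoop]
    rw [← arrK_succ P j hlt]
    have hok : aCheck (arrK P (j + 1)) = true := tstar_ok P hP (j + 1) (by omega) (by omega)
    rw [hok]
    simp only [if_true]
    rw [ih (j + 1) (f + 1) (by omega) (by omega)]
    push_cast
    ring

-- B's check agrees with A's check on every probe
theorem bOk_eq (P : List Int) (hP : P ≠ []) (k : Nat) :
    bOk P (posL P) k = OkK P k := by
  have hbridge : ∀ (xs : List Int) (c : Int) (j : Nat), bScan c (j + 1) xs = aCheckGo c xs := by
    intro xs
    induction xs with
    | nil => intro c j; rfl
    | cons x rest ih =>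
      intro c j
      simp only [bScan, aCheckGo]
      by_cases h : c + x ≤ 0
      · simp [h]
      · simp [h, ih]
  have hne : arrK P k ≠ [] := by
    intro hnil
    have := arrK_length P k
    rw [hnil] at this
    simp at this
    exact hP (List.eq_nil_of_length_eq_zero this.symm)
  obtain ⟨z, rest, hzr⟩ := List.exists_cons_of_ne_nil hne
  show bScan 0 0 (arrK P k) = aCheck (arrK P k)
  rw [hzr]
  simp only [bScan, aCheck]
  norm_num
  exact hbridge rest z 0

-- the binary search of B finds exactly tstar
theorem bSearchGo_eq (P : List Int) (hP : P ≠ []) :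
    ∀ (fuel lo hi : Nat), hi - lo < fuel → lo ≤ tstar P → tstar P ≤ hi → hi ≤ (posL P).length →
      bSearchGo (bOk P (posL P)) fuel lo hi = tstar P := by
  intro fuel
  induction fuel with
  | zero => intro lo hi hd _ _ _; omega
  | succ fuel ih =>
    intro lo hi hd h1 h2 h3
    rcases Nat.lt_or_ge lo hi with hlt | hge
    · show (if lo < hi then _ else lo) = _
      rw [if_pos hlt]
      have hm1 : lo < (lo + hi + 1) / 2 := by omega
      have hm2 : (lo + hi + 1) / 2 ≤ hi := by omega
      rcases Nat.lt_or_ge (tstar P) ((lo + hi + 1) / 2) with hmid | hmid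
      · have : bOk P (posL P) ((lo + hi + 1) / 2) = false := by
          rw [bOk_eq P hP]
          exact tstar_not P _ hmid (by omega)
        rw [this]
        simp only [Bool.false_eq_true, if_false]
        exact ih _ _ (by omega) h1 (by omega) (by omega)
      · have : bOk P (posL P) ((lo + hi + 1) / 2) = true := by
          rw [bOk_eq P hP]
          exact tstar_ok P hP _ (by omega) hmid
        rw [this, if_pos rfl]
        exact ih _ _ (by omega) hmid h2 h3
    · show (if lo < hi then _ else lo) = _
      rw [if_neg (by omega)]
      omega

theorem bSearch_eq (P : List Int) (hP : P ≠ []) (m : Nat) (hm : m = (posL P).length) :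
    bSearch (bOk P (posL P)) 0 m = tstar P := by
  subst hm
  exact bSearchGo_eq P hP _ 0 _ (by omega) (by omega) (tstar_le P) (le_refl _)

-- A computes tstar
theorem a_eq_tstar (P : List Int) (hP : P ≠ []) : getMaxNegativePnL P = (tstar P : Int) := by
  obtain ⟨x, xs, rfl⟩ := List.exists_cons_of_ne_nil hP
  show aLoop (x :: xs) (PySem.List.sorted ((List.range (x :: xs).length).foldl
      (fun acc i => if 0 < (x :: xs).getD i 0 then acc ++ [((x :: xs).getD i 0, i)] else acc) [])
      (fun t => t.1) false) 0 = _
  rw [a_positives_eq]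
  have h0 : arrK (x :: xs) 0 = x :: xs := rfl
  have hd : (posL (x :: xs)).drop 0 = posL (x :: xs) := rfl
  have := aLoop_eq (x :: xs) hP (tstar (x :: xs)) 0 0 (by omega) (by omega)
  rw [h0, hd] at this
  rw [show PySem.List.sorted (posRaw (x :: xs)) (fun t => t.1) false = posL (x :: xs) from rfl]
  rw [this]
  simp

-- B computes tstar
theorem b_eq_tstar (P : List Int) (hP : P ≠ []) : getMaxNegativePnL_alt P = (tstar P : Int) := by
  show (↑(bSearch (bOk P (PySem.List.sorted ((PySem.List.enumerate P 0).filterMap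
      (fun t => if 0 < t.2 then some (t.2, t.1.toNat) else none)) (fun t => t.1) false)) 0
      (PySem.List.sorted ((PySem.List.enumerate P 0).filterMap
      (fun t => if 0 < t.2 then some (t.2, t.1.toNat) else none)) (fun t => t.1) false).length) : Int) = _
  rw [b_positives_eq]
  rw [show PySem.List.sorted (posRaw P) (fun t => t.1) false = posL P from rfl]
  rw [bSearch_eq P hP _ rfl]

-- ===== VERDICT (by name: the statement is the Claim_ definition above) =====
theorem getMaxNegativePnL_spec : Claim_equal_getMaxNegativePnL := by
  intro PnL _ hpre
  unfold Spec_getMaxNegativePnL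
  rw [a_eq_tstar PnL hpre, b_eq_tstar PnL hpre]
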